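-- pv_equiv track=rewrite | github.com/bwj0509/Algorithm | 9625(재귀시간초과).py | cntA
-- ===== SOURCE A (Python) =====
-- def cntA(num):
--     if(num ==0):
--         return 1
--     elif(num == 1):
--         return 0
--     elif(num == 2):
--         return 1
--     else:
--         return cntA(num-1) + cntA(num-2)
-- ===== SOURCE B (Python) =====
-- def cntA(num):
--     a, b = 1, 0
--     for _ in range(num):
--         a, b = b, a + b
--     return a
-- ===== Notes on version B (the rewrite author's own statement) =====
-- stated objective: faster
-- what changed: Replaces the exponential two-branch recursion with an iterative two-variable Fibonacci-style loop.
import Mathlib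
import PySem

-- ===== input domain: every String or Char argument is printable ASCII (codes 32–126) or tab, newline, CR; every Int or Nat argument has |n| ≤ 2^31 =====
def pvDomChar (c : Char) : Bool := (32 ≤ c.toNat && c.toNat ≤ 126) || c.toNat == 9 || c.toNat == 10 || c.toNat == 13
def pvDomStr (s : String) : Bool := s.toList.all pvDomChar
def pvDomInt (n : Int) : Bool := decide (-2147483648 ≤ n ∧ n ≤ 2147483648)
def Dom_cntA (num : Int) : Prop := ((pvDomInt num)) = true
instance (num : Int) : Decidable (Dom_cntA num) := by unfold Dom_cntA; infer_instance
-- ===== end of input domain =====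

-- B replaces A's exponential two-branch recursion with an iterative two-variable loop (asymptotically faster).

-- ===== PORT A =====
-- literal transliteration of A's recursion; the 'num < 0' guard only makes the
-- definition total (Python diverges there; such inputs are outside Pre_cntA)
def cntA (num : Int) : Int :=
  if num = 0 then 1
  else if num = 1 then 0
  else if num = 2 then 1
  else if num < 0 then 0
  else cntA (num - 1) + cntA (num - 2)
termination_by num.toNat
decreasing_by all_goals omega

-- ===== PORT B =====
def cntA_alt (num : Int) : Int :=
  ((PySem.List.pyRange 0 num 1).foldl
    (fun (p : Int × Int) _ => (p.2, p.1 + p.2)) (1, 0)).1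

-- ===== PRECONDITION & SPEC =====
-- Pre_ excludes negative num, on which Python A recurses without bound (RecursionError).
def Pre_cntA (num : Int) : Prop := 0 ≤ num
instance (num : Int) : Decidable (Pre_cntA num) := by unfold Pre_cntA; infer_instance
def pvWitness_cntA : Int := (5)

def Spec_cntA (num : Int) (out : Int) : Prop := out = cntA_alt num
instance (num : Int) (out : Int) : Decidable (Spec_cntA num out) := by unfold Spec_cntA; infer_instance

-- ===== CLAIM (what is proved, stated in full; the proofs are below) =====
def Claim_equal_cntA : Prop := ∀ (num : Int), Dom_cntA num → Pre_cntA num → Spec_cntA num (cntA num)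

-- ===== LEMMAS AND PROOFS =====

-- the loop state after n iterations
def pvLoop (n : Nat) : Int × Int :=
  Nat.rec (1, 0) (fun _ p => (p.2, p.1 + p.2)) n

theorem pvLoop_eq (n : Nat) :
    (PySem.List.pyRange 0 (n : Int) 1).foldl
      (fun (p : Int × Int) _ => (p.2, p.1 + p.2)) (1, 0) = pvLoop n := by
  induction n with
  | zero => simp [pvLoop]
  | succ k ih =>
      have h : (0 : Int) ≤ (k : Int) := by positivity
      have := PySem.List.pyRange_one_succ_right (a := 0) (b := (k : Int)) h
      push_cast
      push_cast at ih
      rw [this, List.foldl_append, ih]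
      simp [pvLoop]

theorem cntA_alt_nat (n : Nat) : cntA_alt (n : Int) = (pvLoop n).1 := by
  simp [cntA_alt, pvLoop_eq]

theorem cntA_nat (n : Nat) : cntA (n : Int) = (pvLoop n).1 := by
  induction n using Nat.strong_induction_on with
  | _ n ih =>
    match n with
    | 0 => unfold cntA; norm_num [pvLoop]
    | 1 => unfold cntA; norm_num [pvLoop]
    | 2 => unfold cntA; norm_num [pvLoop]; decide
    | (m+3) =>
      unfold cntA
      have h1 : ((m+3 : Nat) : Int) - 1 = ((m+2 : Nat) : Int) := by push_cast; ring
      have h2 : ((m+3 : Nat) : Int) - 2 = ((m+1 : Nat) : Int) := by push_cast; ring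
      have e1 := ih (m+2) (by omega)
      have e2 := ih (m+1) (by omega)
      rw [if_neg (by positivity), if_neg (by omega), if_neg (by omega), if_neg (by omega),
        h1, h2, e1, e2]
      simp [pvLoop]
      ring

-- ===== VERDICT (by name: the statement is the Claim_ definition above) =====
theorem cntA_spec : Claim_equal_cntA := by
  intro num _ hpre
  unfold Spec_cntA
  obtain ⟨n, rfl⟩ := Int.eq_ofNat_of_zero_le hpre
  rw [cntA_nat, cntA_alt_nat]
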